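-- pv_equiv track=rewrite | github.com/Denmerck/List-Manipulator-py | module/list.py | wipe
-- ===== SOURCE A (Python) =====
-- def wipe(A: list, amount: int | None = None) -> list:
--     """
--     Wipes a certain amount of items in a list, no amount value will wipe all contents.
--     :param A: Target list
--     :type A: list
--     :param amount: Number of items to wipe
--     :type amount: int
--     :return: Wiped list
--     """
--     if amount == None:
--         return []
--     for i in range(amount):
--         try:
--             A.pop(-1)
--         except IndexError:
--             return []
--     return A
-- ===== SOURCE B (Python) =====
-- def wipe(A: list, amount: int | None = None) -> list:
--     """
--     Wipes a certain amount of items in a list, no amount value will wipe all contents.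
--     """
--     if amount is None:
--         return []
--     del A[max(len(A) - amount, 0):]
--     return A
-- ===== Notes on version B (the rewrite author's own statement) =====
-- stated objective: idiomatic
-- what changed: Replaces the pop-one-at-a-time loop with a try/except around each pop by a single slice deletion at the computed cut point max(len(A)-amount, 0).
import Mathlib
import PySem

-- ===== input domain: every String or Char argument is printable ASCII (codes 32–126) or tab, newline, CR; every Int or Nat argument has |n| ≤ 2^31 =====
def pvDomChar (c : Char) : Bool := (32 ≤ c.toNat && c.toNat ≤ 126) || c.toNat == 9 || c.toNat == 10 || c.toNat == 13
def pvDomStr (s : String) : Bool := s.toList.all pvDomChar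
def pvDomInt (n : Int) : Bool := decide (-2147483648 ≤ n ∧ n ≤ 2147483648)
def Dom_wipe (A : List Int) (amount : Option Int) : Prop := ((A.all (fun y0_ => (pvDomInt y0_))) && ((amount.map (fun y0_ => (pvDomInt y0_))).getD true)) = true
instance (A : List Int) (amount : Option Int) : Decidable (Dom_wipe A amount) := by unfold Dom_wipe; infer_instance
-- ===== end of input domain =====

-- B replaces A's pop-per-iteration loop (with try/except) by one slice deletion; return values agree,
-- but note both Pythons mutate the argument list in place — the claim is about the return value.

-- ===== PORT A =====
-- for i in range(amount): try: A.pop(-1) except IndexError: return []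
def wipeLoop (A : List Int) : Nat → List Int
  | 0 => A
  | k + 1 =>
    match PySem.List.pop? A (-1) with
    | none => []                    -- IndexError: return []
    | some (_, A') => wipeLoop A' k

def wipe (A : List Int) (amount : Option Int) : List Int :=
  match amount with
  | none => []                      -- if amount == None: return []
  | some n => wipeLoop A n.toNat    -- range(n) performs max(n,0) iterations

-- ===== PORT B =====
-- del A[max(len(A) - amount, 0):]; return A  — the kept prefix is A[:max(len(A)-amount, 0)]
def wipe_alt (A : List Int) (amount : Option Int) : List Int :=
  match amount with
  | none => []
  | some n => A.take (max ((A.length : Int) - n) 0).toNat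

-- ===== PRECONDITION & SPEC =====
def Spec_wipe (A : List Int) (amount : Option Int) (out : List Int) : Prop := out = wipe_alt A amount
instance (A : List Int) (amount : Option Int) (out : List Int) : Decidable (Spec_wipe A amount out) := by unfold Spec_wipe; infer_instance

-- ===== CLAIM (what is proved, stated in full; the proofs are below) =====
def Claim_equal_wipe : Prop := ∀ (A : List Int) (amount : Option Int), Dom_wipe A amount → Spec_wipe A amount (wipe A amount)

-- ===== LEMMAS AND PROOFS =====

theorem pop?_neg_one_eq (A : List Int) (h : A ≠ []) :
    PySem.List.pop? A (-1) = some (A.getLast h, A.dropLast) := by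
  have := PySem.List.pop?_last A.dropLast (A.getLast h)
  rwa [List.dropLast_append_getLast h] at this

theorem pop?_nil : PySem.List.pop? ([] : List Int) (-1) = none := by decide

theorem wipeLoop_eq_take (k : Nat) : ∀ (A : List Int), wipeLoop A k = A.take (A.length - k) := by
  induction k with
  | zero => intro A; simp [wipeLoop]
  | succ k ih =>
    intro A
    by_cases h : A = []
    · subst h; simp [wipeLoop, pop?_nil]
    · rw [wipeLoop]
      simp only [pop?_neg_one_eq A h]
      rw [ih]
      have hlen : A.dropLast.length = A.length - 1 := by simp
      have h1 : 1 ≤ A.length := List.length_pos_iff.mpr h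
      rw [hlen]
      have : A.length - 1 - k = A.length - (k + 1) := by omega
      rw [this]
      rw [List.dropLast_eq_take, List.take_take]
      congr 1
      omega

-- ===== VERDICT (by name: the statement is the Claim_ definition above) =====
theorem wipe_spec : Claim_equal_wipe := by
  intro A amount _
  unfold Spec_wipe
  cases amount with
  | none => rfl
  | some n =>
    show wipeLoop A n.toNat = A.take (max ((A.length : Int) - n) 0).toNat
    rw [wipeLoop_eq_take]
    by_cases hn : 0 ≤ n
    · have h : (max ((A.length : Int) - n) 0).toNat = A.length - n.toNat := by
        rw [← Int.toNat_eq_max, Int.toNat_natCast]; omega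
      rw [h]
    · have h1 : A.length - n.toNat = A.length := by omega
      have h2 : A.length ≤ (max ((A.length : Int) - n) 0).toNat := by
        rw [← Int.toNat_eq_max, Int.toNat_natCast]; omega
      rw [h1, List.take_length, List.take_of_length_le h2]
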